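-- pv_equiv track=rewrite | github.com/Satyamrtiwari/Resume-JD-matcher_backend2 | project/app/utils/pdf_extractor.py | extract_relevant_resume_text
-- ===== SOURCE A (Python) =====
-- def extract_relevant_resume_text(text):
--     """
--     Keep only relevant resume sections to avoid noise.
--     This improves ML similarity scores.
--     """
--     keywords = ["skills", "projects", "experience", "internship"]
--     lines = text.lower().split("\n")
--
--     relevant_lines = []
--     keep = False
--
--     for line in lines:
--         if any(keyword in line for keyword in keywords):
--             keep = True
--         if keep:
--             relevant_lines.append(line)
--
--     # fallback if nothing detected
--     if not relevant_lines:
--         return text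
--
--     return " ".join(relevant_lines)
-- ===== SOURCE B (Python) =====
-- def extract_relevant_resume_text(text):
--     """
--     Keep only relevant resume sections to avoid noise.
--     This improves ML similarity scores.
--     """
--     keywords = ["skills", "projects", "experience", "internship"]
--     low = text.lower()
--     hits = [p for p in (low.find(k) for k in keywords) if p != -1]
--     if not hits:
--         return text
--     cut = low[:min(hits)].count("\n")
--     return " ".join(low.split("\n")[cut:])
-- ===== Notes on version B (the rewrite author's own statement) =====
-- stated objective: alternative
-- what changed: Instead of scanning line by line with a keep flag, B searches the whole lowered string once for the earliest occurrence of any keyword, derives the starting line index as the number of newlines before that position, and joins the tail lines from there; no per-line keyword test is performed.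
import Mathlib
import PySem

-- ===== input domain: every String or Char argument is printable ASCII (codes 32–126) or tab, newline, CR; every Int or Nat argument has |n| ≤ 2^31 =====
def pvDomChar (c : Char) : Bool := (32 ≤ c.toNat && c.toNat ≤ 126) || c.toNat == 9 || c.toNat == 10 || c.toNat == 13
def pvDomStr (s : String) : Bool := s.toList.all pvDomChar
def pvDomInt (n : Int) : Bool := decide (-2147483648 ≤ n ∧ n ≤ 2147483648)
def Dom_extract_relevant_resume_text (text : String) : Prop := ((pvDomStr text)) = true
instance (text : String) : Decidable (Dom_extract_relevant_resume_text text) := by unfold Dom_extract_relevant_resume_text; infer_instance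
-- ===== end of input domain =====

-- B replaces A's per-line keep-flag scan by one whole-string search for the earliest
-- keyword occurrence, counting the newlines before it to locate the cut line (objective: alternative).

-- the keyword list both Pythons hard-code
def pvKeywords : List String := ["skills", "projects", "experience", "internship"]

-- ===== PORT A =====
-- 'any(keyword in line for keyword in keywords)'
def pvLineMatch (line : String) : Bool := pvKeywords.any (fun k => PySem.Str.isIn k line)

-- the body of A's for-loop: state = (relevant_lines, keep)
def pvStepA (st : List String × Bool) (line : String) : List String × Bool :=
  let keep := if pvLineMatch line then true else st.2
  (if keep then st.1 ++ [line] else st.1, keep)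

-- s.split("\n") with a nonempty separator: split? is always some, the .getD default is unreachable
def extract_relevant_resume_text (text : String) : String :=
  let lines := ((PySem.Str.split? (PySem.Str.lower text) "\n").getD [])
  let res := lines.foldl pvStepA ([], false)
  if res.1 = [] then text else PySem.Str.join " " res.1

-- ===== PORT B =====
def extract_relevant_resume_text_alt (text : String) : String :=
  let low := PySem.Str.lower text
  let hits := (pvKeywords.map (fun k => PySem.Str.find low k)).filter (fun p => p ≠ -1)
  match PySem.List.min? hits (fun x => x) with
  | none => text
  | some m =>
    let cut := PySem.Str.count (PySem.Str.slice low none (some m)) "\n"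
    PySem.Str.join " " (PySem.List.slice ((PySem.Str.split? low "\n").getD []) (some (cut : Int)) none)

-- ===== PRECONDITION & SPEC =====
def Spec_extract_relevant_resume_text (text : String) (out : String) : Prop := out = extract_relevant_resume_text_alt text
instance (text : String) (out : String) : Decidable (Spec_extract_relevant_resume_text text out) := by unfold Spec_extract_relevant_resume_text; infer_instance

-- ===== CLAIM (what is proved, stated in full; the proofs are below) =====
def Claim_equal_extract_relevant_resume_text : Prop := ∀ (text : String), Dom_extract_relevant_resume_text text → Spec_extract_relevant_resume_text text (extract_relevant_resume_text text)

-- ===== LEMMAS AND PROOFS =====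

-- once keep is True, A's loop appends every remaining line
theorem pvFoldTrue (lines : List String) (acc : List String) :
    lines.foldl pvStepA (acc, true) = (acc ++ lines, true) := by
  induction lines generalizing acc with
  | nil => simp
  | cons l t ih => simp [pvStepA, ih]

-- A's loop from the initial state, characterised by the first matching index
theorem pvFoldFalse (lines : List String) :
    lines.foldl pvStepA ([], false) =
      match lines.findIdx? pvLineMatch with
      | none => ([], false)
      | some i => (lines.drop i, true) := by
  induction lines with
  | nil => simp
  | cons l t ih =>
    rw [List.findIdx?_cons]
    by_cases h : pvLineMatch l
    · simp [List.foldl_cons, pvStepA, h, pvFoldTrue]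
    · simp only [List.foldl_cons, pvStepA, h, if_neg, Bool.false_eq_true,
        not_false_eq_true]
      rw [ih]
      cases t.findIdx? pvLineMatch <;> simp

-- a clean cons-recursion equal to Python's s.split("\n") on char lists
def pvSplit : List Char → List (List Char)
  | [] => [[]]
  | c :: t => if c = '\n' then [] :: pvSplit t else (pvSplit t).modifyHead (c :: ·)

theorem pvSplit_ne_nil (l : List Char) : pvSplit l ≠ [] := by
  induction l with
  | nil => simp [pvSplit]
  | cons c t ih =>
    by_cases h : c = '\n' <;> simp only [pvSplit, h, if_pos, reduceIte] <;> simp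
    cases hp : pvSplit t with
    | nil => exact absurd hp ih
    | cons a b => simp

theorem pvSplitOn_go_eq (l : List Char) : ∀ (fuel : Nat) (cur : List Char) (acc : List (List Char)),
    l.length < fuel →
    PySem.Chars.splitOn.go ['\n'] fuel l cur acc
      = acc.reverse ++ (pvSplit l).modifyHead (cur.reverse ++ ·) := by
  induction l with
  | nil =>
    intro fuel cur acc hf
    match fuel with
    | f + 1 => simp [PySem.Chars.splitOn.go, pvSplit]
  | cons c t ih =>
    intro fuel cur acc hf
    match fuel with
    | f + 1 =>
      by_cases h : c = '\n'
      · subst h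
        have : ['\n'].isPrefixOf ('\n' :: t) = true := by simp [List.isPrefixOf]
        rw [PySem.Chars.splitOn.go]
        simp only [this, if_pos, List.length_cons, List.length_nil, List.drop_succ_cons, List.drop_zero]
        rw [ih f [] (cur.reverse :: acc) (by simpa using hf)]
        cases hp : pvSplit t with
        | nil => exact absurd hp (pvSplit_ne_nil t)
        | cons a b => simp [pvSplit, hp, List.modifyHead]
      · have : ['\n'].isPrefixOf (c :: t) = false := by
          simp [List.isPrefixOf]; exact fun hc => absurd hc.symm h
        rw [PySem.Chars.splitOn.go]
        simp only [this, Bool.false_eq_true, reduceIte]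
        rw [ih f (c :: cur) acc (by simpa using hf)]
        cases hp : pvSplit t with
        | nil => exact absurd hp (pvSplit_ne_nil t)
        | cons a b => simp [pvSplit, h, hp, List.modifyHead]

theorem pvSplitOn_eq (cs : List Char) :
    PySem.Chars.splitOn cs ['\n'] = pvSplit cs := by
  rw [PySem.Chars.splitOn, pvSplitOn_go_eq cs (cs.length + 1) [] [] (by omega)]
  cases hp : pvSplit cs with
  | nil => exact absurd hp (pvSplit_ne_nil cs)
  | cons a b => simp

theorem pvSplit_append (l₀ rest : List Char) (h : '\n' ∉ l₀) :
    pvSplit (l₀ ++ '\n' :: rest) = l₀ :: pvSplit rest := by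
  induction l₀ with
  | nil => simp [pvSplit]
  | cons c t ih =>
    have hc : c ≠ '\n' := fun hc => h (hc ▸ List.mem_cons_self)
    have ht : '\n' ∉ t := fun hm => h (List.mem_cons_of_mem _ hm)
    simp only [List.cons_append, pvSplit, hc, reduceIte, ih ht, List.modifyHead]

theorem pvSplit_no_nl (cs : List Char) (h : '\n' ∉ cs) : pvSplit cs = [cs] := by
  induction cs with
  | nil => simp [pvSplit]
  | cons c t ih =>
    have hc : c ≠ '\n' := fun hc => h (hc ▸ List.mem_cons_self)
    have ht : '\n' ∉ t := fun hm => h (List.mem_cons_of_mem _ hm)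
    simp [pvSplit, hc, ih ht, List.modifyHead]

theorem pvCount_go (l : List Char) : ∀ (fuel : Nat) (acc : Nat), l.length ≤ fuel →
    PySem.Chars.count.go ['\n'] fuel l acc = acc + l.count '\n' := by
  induction l with
  | nil =>
    intro fuel acc hf
    match fuel with
    | 0 => simp [PySem.Chars.count.go]
    | f + 1 => simp [PySem.Chars.count.go]
  | cons c t ih =>
    intro fuel acc hf
    match fuel with
    | f + 1 =>
      by_cases h : c = '\n'
      · subst h
        have hp : ['\n'].isPrefixOf ('\n' :: t) = true := by simp [List.isPrefixOf]
        rw [PySem.Chars.count.go]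
        simp only [hp, if_pos, List.length_singleton, List.drop_succ_cons, List.drop_zero]
        rw [ih f (acc + 1) (by simpa using hf)]
        simp
        omega
      · have hp : ['\n'].isPrefixOf (c :: t) = false := by
          simp [List.isPrefixOf]; exact fun hc => absurd hc.symm h
        rw [PySem.Chars.count.go]
        simp only [hp, Bool.false_eq_true, reduceIte]
        rw [ih f acc (by simpa using hf)]
        simp [h]

theorem pvCount_single (s : List Char) : PySem.Chars.count s ['\n'] = s.count '\n' := by
  rw [PySem.Chars.count]
  simp only [List.isEmpty_cons, Bool.false_eq_true, reduceIte]
  rw [pvCount_go s s.length 0 le_rfl]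
  omega

theorem pvFind_unique (s sub : List Char) (n : Nat)
    (h1 : sub <+: s.drop n) (h2 : ∀ i < n, ¬ sub <+: s.drop i) :
    PySem.Chars.find s sub = n := by
  have hin : PySem.Chars.isIn sub s = true :=
    (PySem.Chars.exists_prefix_drop_iff_isIn sub s).mp ⟨n, h1⟩
  have h0 : 0 ≤ PySem.Chars.find s sub :=
    (PySem.Chars.find_nonneg_iff s sub).mpr ((PySem.Chars.isIn_iff_infix sub s).mp hin)
  obtain ⟨hpre, hmin⟩ := PySem.Chars.find_spec (s := s) (sub := sub) h0
  have : (PySem.Chars.find s sub).toNat = n := by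
    rcases lt_trichotomy (PySem.Chars.find s sub).toNat n with h | h | h
    · exact absurd hpre (h2 _ h)
    · exact h
    · exact absurd h1 (hmin n h)
  omega

theorem pvPrefix_no_cross (sub a b : List Char) (hnl : '\n' ∉ sub)
    (h : sub <+: a ++ '\n' :: b) : sub <+: a := by
  by_cases hle : sub.length ≤ a.length
  · have := List.prefix_iff_eq_take.mp h
    rw [List.take_append_of_le_length hle] at this
    exact this ▸ List.take_prefix _ _
  · exfalso
    apply hnl
    have heq := List.prefix_iff_eq_take.mp h
    have : (a ++ '\n' :: b).take sub.length = a ++ ('\n' :: b).take (sub.length - a.length) := by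
      rw [← List.take_length_add_append (sub.length - a.length)]
      congr 1
      omega
    rw [this] at heq
    have : sub.length - a.length ≥ 1 := by omega
    rw [heq]
    match hm : sub.length - a.length, this with
    | m + 1, _ => simp

theorem pvIsIn_append (k l₀ rest : List Char) (hnl : '\n' ∉ k) :
    PySem.Chars.isIn k (l₀ ++ '\n' :: rest) = (PySem.Chars.isIn k l₀ || PySem.Chars.isIn k rest) := by
  apply Bool.coe_iff_coe.mp
  rw [Bool.or_eq_true]
  constructor
  · intro hin
    obtain ⟨j, hj⟩ := (PySem.Chars.exists_prefix_drop_iff_isIn k _).mpr hin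
    by_cases hle : j ≤ l₀.length
    · rw [List.drop_append_of_le_length hle] at hj
      exact Or.inl ((PySem.Chars.exists_prefix_drop_iff_isIn k l₀).mp ⟨j, pvPrefix_no_cross k _ rest hnl hj⟩)
    · right
      have : (l₀ ++ '\n' :: rest).drop j = rest.drop (j - l₀.length - 1) := by
        have h1 : j = l₀.length + (j - l₀.length) := by omega
        rw [h1, List.drop_length_add_append]
        have h2 : j - l₀.length = (j - l₀.length - 1) + 1 := by omega
        rw [h2, List.drop_succ_cons]
        congr 1
        omega
      rw [this] at hj
      exact (PySem.Chars.exists_prefix_drop_iff_isIn k rest).mp ⟨_, hj⟩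
  · intro hin
    rcases hin with hin | hin
    · obtain ⟨j, hj⟩ := (PySem.Chars.exists_prefix_drop_iff_isIn k l₀).mpr hin
      apply (PySem.Chars.exists_prefix_drop_iff_isIn k _).mp
      refine ⟨min j l₀.length, ?_⟩
      have hle : min j l₀.length ≤ l₀.length := min_le_right _ _
      rw [List.drop_append_of_le_length hle]
      have : l₀.drop j = l₀.drop (min j l₀.length) := by
        rcases le_or_gt j l₀.length with h | h
        · rw [min_eq_left h]
        · rw [List.drop_eq_nil_of_le (by omega), min_eq_right (by omega), List.drop_length]
      rw [this] at hj
      exact hj.trans (List.prefix_append _ _)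
    · obtain ⟨j, hj⟩ := (PySem.Chars.exists_prefix_drop_iff_isIn k rest).mpr hin
      apply (PySem.Chars.exists_prefix_drop_iff_isIn k _).mp
      refine ⟨l₀.length + 1 + j, ?_⟩
      have : (l₀ ++ '\n' :: rest).drop (l₀.length + 1 + j) = rest.drop j := by
        have h1 : l₀.length + 1 + j = l₀.length + (1 + j) := by omega
        rw [h1, List.drop_length_add_append, add_comm 1 j, List.drop_succ_cons]
      rw [this]
      exact hj

theorem pvFind_lt_of_isIn (k l₀ : List Char) (hk : k ≠ []) (h : PySem.Chars.isIn k l₀ = true) :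
    0 ≤ PySem.Chars.find l₀ k ∧ PySem.Chars.find l₀ k < l₀.length := by
  have h0 : 0 ≤ PySem.Chars.find l₀ k :=
    (PySem.Chars.find_nonneg_iff l₀ k).mpr ((PySem.Chars.isIn_iff_infix k l₀).mp h)
  obtain ⟨hpre, -⟩ := PySem.Chars.find_spec (s := l₀) (sub := k) h0
  have hlen := hpre.length_le
  have hk1 : 1 ≤ k.length := by cases k with | nil => exact absurd rfl hk | cons a b => simp
  have := List.length_drop (l := l₀) (i := (PySem.Chars.find l₀ k).toNat)
  omega

theorem pvFind_append_of_left (k l₀ rest : List Char) (hnl : '\n' ∉ k)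
    (h : PySem.Chars.isIn k l₀ = true) :
    PySem.Chars.find (l₀ ++ '\n' :: rest) k = PySem.Chars.find l₀ k := by
  have h0 : 0 ≤ PySem.Chars.find l₀ k :=
    (PySem.Chars.find_nonneg_iff l₀ k).mpr ((PySem.Chars.isIn_iff_infix k l₀).mp h)
  obtain ⟨hpre, hmin⟩ := PySem.Chars.find_spec (s := l₀) (sub := k) h0
  set p := (PySem.Chars.find l₀ k).toNat with hp
  have hple : p ≤ l₀.length := by
    have := PySem.Chars.find_le_length l₀ k
    omega
  have := pvFind_unique (l₀ ++ '\n' :: rest) k p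
    (by rw [List.drop_append_of_le_length hple]; exact hpre.trans (List.prefix_append _ _))
    (by
      intro i hi hpre2
      have hile : i ≤ l₀.length := by omega
      rw [List.drop_append_of_le_length hile] at hpre2
      exact hmin i hi (pvPrefix_no_cross k _ rest hnl hpre2))
  omega

theorem pvFind_append_of_not_left (k l₀ rest : List Char) (hnl : '\n' ∉ k)
    (h : PySem.Chars.isIn k l₀ = false) :
    PySem.Chars.find (l₀ ++ '\n' :: rest) k =
      if PySem.Chars.isIn k rest then (l₀.length : Int) + 1 + PySem.Chars.find rest k else -1 := by
  by_cases hr : PySem.Chars.isIn k rest = true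
  · rw [if_pos hr]
    have h0 : 0 ≤ PySem.Chars.find rest k :=
      (PySem.Chars.find_nonneg_iff rest k).mpr ((PySem.Chars.isIn_iff_infix k rest).mp hr)
    obtain ⟨hpre, hmin⟩ := PySem.Chars.find_spec (s := rest) (sub := k) h0
    set p := (PySem.Chars.find rest k).toNat with hp
    have := pvFind_unique (l₀ ++ '\n' :: rest) k (l₀.length + 1 + p)
      (by
        have : (l₀ ++ '\n' :: rest).drop (l₀.length + 1 + p) = rest.drop p := by
          have h1 : l₀.length + 1 + p = l₀.length + (1 + p) := by omega
          rw [h1, List.drop_length_add_append, add_comm 1 p, List.drop_succ_cons]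
        rw [this]; exact hpre)
      (by
        intro i hi hpre2
        by_cases hile : i ≤ l₀.length
        · rw [List.drop_append_of_le_length hile] at hpre2
          have := pvPrefix_no_cross k _ rest hnl hpre2
          have : PySem.Chars.isIn k l₀ = true :=
            (PySem.Chars.exists_prefix_drop_iff_isIn k l₀).mp ⟨i, this⟩
          simp [this] at h
        · have : (l₀ ++ '\n' :: rest).drop i = rest.drop (i - l₀.length - 1) := by
            have h1 : i = l₀.length + (i - l₀.length) := by omega
            rw [h1, List.drop_length_add_append]
            have h2 : i - l₀.length = (i - l₀.length - 1) + 1 := by omega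
            rw [h2, List.drop_succ_cons]
            congr 1
            omega
          rw [this] at hpre2
          exact hmin _ (by omega) hpre2)
    omega
  · rw [if_neg hr]
    rw [PySem.Chars.find_eq_neg_one_iff]
    intro hinf
    have : PySem.Chars.isIn k (l₀ ++ '\n' :: rest) = true := (PySem.Chars.isIn_iff_infix _ _).mpr hinf
    rw [pvIsIn_append k l₀ rest hnl, h] at this
    simp at this
    exact hr this

def pvHits (cs : List Char) : List Int :=
  (pvKeywords.map (fun k => PySem.Chars.find cs k.toList)).filter (fun p => p ≠ -1)
def pvMatchL (l : List Char) : Bool := pvKeywords.any (fun k => PySem.Chars.isIn k.toList l)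

theorem pvKw_props : ∀ k ∈ pvKeywords, k.toList ≠ [] ∧ '\n' ∉ k.toList := by decide

theorem pvHits_nonneg (cs : List Char) : ∀ x ∈ pvHits cs, 0 ≤ x := by
  intro x hx
  rw [pvHits, List.mem_filter] at hx
  obtain ⟨hmem, hne⟩ := hx
  obtain ⟨k, -, hk⟩ := List.mem_map.mp hmem
  have := PySem.Chars.neg_one_le_find cs k.toList
  rw [hk] at this
  simp only [decide_eq_true_eq] at hne
  omega

theorem pvHits_eq_nil_iff (cs : List Char) : pvHits cs = [] ↔ pvMatchL cs = false := by
  rw [pvHits, pvMatchL, List.filter_eq_nil_iff, List.any_eq_false]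
  constructor
  · intro h k hk
    have := h _ (List.mem_map.mpr ⟨k, hk, rfl⟩)
    simp only [decide_eq_true_eq, not_not] at this
    rw [PySem.Chars.isIn, this]
    simp
  · intro h x hx
    obtain ⟨k, hk, hfk⟩ := List.mem_map.mp hx
    have := h k hk
    rw [PySem.Chars.isIn] at this
    have hf1 : PySem.Chars.find cs k.toList = -1 := by simpa using this
    have hx1 : x = -1 := by rw [← hfk, hf1]
    simp [hx1]

theorem pvHitsGen_shift (ks : List String) (l₀ rest : List Char)
    (hprops : ∀ k ∈ ks, k.toList ≠ [] ∧ '\n' ∉ k.toList)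
    (hno : ∀ k ∈ ks, PySem.Chars.isIn k.toList l₀ = false) :
    ((ks.map (fun k => PySem.Chars.find (l₀ ++ '\n' :: rest) k.toList)).filter (fun p => p ≠ -1))
      = (((ks.map (fun k => PySem.Chars.find rest k.toList)).filter (fun p => p ≠ -1)).map
          (· + ((l₀.length : Int) + 1))) := by
  induction ks with
  | nil => simp
  | cons k t ih =>
    have hk := hprops k List.mem_cons_self
    have hnok := hno k List.mem_cons_self
    have ihs := ih (fun x hx => hprops x (List.mem_cons_of_mem _ hx))
      (fun x hx => hno x (List.mem_cons_of_mem _ hx))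
    simp only [List.map_cons, List.filter_cons]
    rw [pvFind_append_of_not_left k.toList l₀ rest hk.2 hnok]
    by_cases hr : PySem.Chars.isIn k.toList rest = true
    · have h0 : 0 ≤ PySem.Chars.find rest k.toList :=
        (PySem.Chars.find_nonneg_iff _ _).mpr ((PySem.Chars.isIn_iff_infix _ _).mp hr)
      rw [if_pos hr]
      have h1 : (decide (¬(l₀.length : Int) + 1 + PySem.Chars.find rest k.toList = -1)) = true := by
        simp; omega
      have h2 : (decide (¬PySem.Chars.find rest k.toList = -1)) = true := by simp; omega
      simp only [h1, h2, if_pos, List.map_cons, ihs]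
      congr 1
      omega
    · have hr' : PySem.Chars.isIn k.toList rest = false := by
        cases h : PySem.Chars.isIn k.toList rest
        · rfl
        · exact absurd h hr
      have hf : PySem.Chars.find rest k.toList = -1 := by
        rw [PySem.Chars.isIn] at hr'
        simpa using hr'
      rw [if_neg (by simp [hr'])]
      simp only [hf]
      rw [if_neg (by simp)]
      exact ihs

-- if xs ≠ [], Python's min returns some value
theorem pvMin?_isSome (xs : List Int) (h : xs ≠ []) :
    ∃ m, PySem.List.min? xs (fun x => x) = some m := by
  cases hm : PySem.List.min? xs (fun x => x) with
  | none => exact absurd ((PySem.List.min?_eq_none_iff xs _).mp hm) h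
  | some m => exact ⟨m, rfl⟩

theorem pvMatchL_exists (l : List Char) (h : pvMatchL l = true) :
    ∃ k ∈ pvKeywords, PySem.Chars.isIn k.toList l = true := by
  simpa [pvMatchL] using h

theorem pvMain_noNL (cs : List Char) (h : '\n' ∉ cs) :
    (match PySem.List.min? (pvHits cs) (fun x => x) with
     | none => (pvSplit cs).findIdx? pvMatchL = none
     | some m => (pvSplit cs).findIdx? pvMatchL = some ((cs.take m.toNat).count '\n')) := by
  rw [pvSplit_no_nl cs h]
  by_cases hm : pvMatchL cs = true
  · have hne : pvHits cs ≠ [] := fun hnil => by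
      rw [(pvHits_eq_nil_iff cs).mp hnil] at hm; exact Bool.false_ne_true hm
    obtain ⟨m, hmin⟩ := pvMin?_isSome _ hne
    rw [hmin]
    have hcnt : ((cs.take m.toNat).count '\n') = 0 :=
      List.count_eq_zero.mpr (fun hmem => h (List.mem_of_mem_take hmem))
    simp [List.findIdx?_cons, hm, hcnt]
  · have hnil : pvHits cs = [] := by
      rcases (pvHits_eq_nil_iff cs) with ⟨-, h2⟩
      exact h2 (Bool.eq_false_iff.mpr (fun ht => hm ht))
    rw [hnil]
    have : PySem.List.min? ([] : List Int) (fun x => x) = none := rfl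
    rw [this]
    simp [List.findIdx?_cons, hm]

theorem pvMain : ∀ (n : Nat) (cs : List Char), cs.length ≤ n →
    (match PySem.List.min? (pvHits cs) (fun x => x) with
     | none => (pvSplit cs).findIdx? pvMatchL = none
     | some m => (pvSplit cs).findIdx? pvMatchL = some ((cs.take m.toNat).count '\n')) := by
  intro n
  induction n with
  | zero =>
    intro cs hlen
    have : cs = [] := List.eq_nil_of_length_eq_zero (by omega)
    subst this
    exact pvMain_noNL [] (by simp)
  | succ n ih =>
    intro cs hlen
    by_cases hnl : '\n' ∈ cs
    case neg => exact pvMain_noNL cs hnl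
    case pos =>
    -- split cs at the first newline
    set l₀ := cs.takeWhile (fun c => c ≠ '\n') with hl₀
    have hdne : cs.dropWhile (fun c => c ≠ '\n') ≠ [] := by
      simp only [ne_eq, List.dropWhile_eq_nil_iff, not_forall]
      exact ⟨'\n', hnl, by simp⟩
    set rest := (cs.dropWhile (fun c => c ≠ '\n')).tail with hrest
    have hhead : (cs.dropWhile (fun c => c ≠ '\n')).head hdne = '\n' := by
      have := List.head_dropWhile_not (fun c => c ≠ '\n') hdne
      simpa using this
    have hcs : cs = l₀ ++ '\n' :: rest := by
      conv_lhs => rw [← List.takeWhile_append_dropWhile (p := fun c => decide (c ≠ '\n')) (l := cs)]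
      rw [← List.cons_head_tail hdne, hhead]
    have hnl₀ : '\n' ∉ l₀ := fun hmem => by
      have := List.mem_takeWhile_imp hmem
      simp at this
    have hrlen : rest.length ≤ n := by
      have := congrArg List.length hcs
      simp at this
      omega
    rw [hcs, pvSplit_append l₀ rest hnl₀]
    by_cases hm : pvMatchL l₀ = true
    · -- first line matches: A gives index 0, B's earliest hit is inside l₀
      obtain ⟨k, hk, hkin⟩ := pvMatchL_exists l₀ hm
      have hprops := pvKw_props k hk
      have hf := pvFind_append_of_left k.toList l₀ rest hprops.2 hkin
      obtain ⟨hf0, hflt⟩ := pvFind_lt_of_isIn k.toList l₀ hprops.1 hkin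
      have hfmem : PySem.Chars.find (l₀ ++ '\n' :: rest) k.toList ∈ pvHits (l₀ ++ '\n' :: rest) := by
        rw [pvHits, List.mem_filter]
        exact ⟨List.mem_map.mpr ⟨k, hk, rfl⟩, by rw [hf]; simp; omega⟩
      have hne : pvHits (l₀ ++ '\n' :: rest) ≠ [] := fun hnil => by
        rw [hnil] at hfmem; exact List.not_mem_nil hfmem
      obtain ⟨m, hmin⟩ := pvMin?_isSome _ hne
      rw [hmin]
      have hm0 : 0 ≤ m := pvHits_nonneg _ _ (PySem.List.min?_mem hmin)
      have hmle : m ≤ PySem.Chars.find (l₀ ++ '\n' :: rest) k.toList :=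
        PySem.List.min?_isMin hmin _ hfmem
      have hmlt : m.toNat ≤ l₀.length := by rw [hf] at hmle; omega
      have htake : (l₀ ++ '\n' :: rest).take m.toNat = l₀.take m.toNat :=
        List.take_append_of_le_length hmlt
      have hcnt : (((l₀ ++ '\n' :: rest)).take m.toNat).count '\n' = 0 := by
        rw [htake]
        exact List.count_eq_zero.mpr
          (fun hmem => hnl₀ (List.mem_of_mem_take hmem))
      simp [List.findIdx?_cons, hm, hcnt]
    · -- first line does not match: shift the whole problem to rest
      have hno : ∀ k ∈ pvKeywords, PySem.Chars.isIn k.toList l₀ = false := by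
        intro k hk
        have := List.any_eq_false.mp (Bool.eq_false_iff.mpr (fun ht => hm ht)) k hk
        simpa using this
      have hshift : pvHits (l₀ ++ '\n' :: rest)
          = (pvHits rest).map (· + ((l₀.length : Int) + 1)) := by
        rw [pvHits, pvHits]
        exact pvHitsGen_shift pvKeywords l₀ rest pvKw_props hno
      have ihr := ih rest hrlen
      cases hrnil : pvHits rest with
      | nil =>
        have h1 : pvHits (l₀ ++ '\n' :: rest) = [] := by rw [hshift, hrnil]; rfl
        rw [h1]
        have h2 : PySem.List.min? ([] : List Int) (fun x => x) = none := rfl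
        rw [h2]
        rw [hrnil] at ihr
        rw [h2] at ihr
        simp [List.findIdx?_cons, hm, ihr]
      | cons a t =>
        have hrne : pvHits rest ≠ [] := by rw [hrnil]; simp
        obtain ⟨m', hm'⟩ := pvMin?_isSome _ hrne
        have hne : pvHits (l₀ ++ '\n' :: rest) ≠ [] := by
          rw [hshift, hrnil]; simp
        obtain ⟨m, hmin⟩ := pvMin?_isSome _ hne
        -- m = m' + (l₀.length + 1)
        have hm'0 : 0 ≤ m' := pvHits_nonneg _ _ (PySem.List.min?_mem hm')
        have hmem1 : m' + ((l₀.length : Int) + 1) ∈ pvHits (l₀ ++ '\n' :: rest) := by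
          rw [hshift]
          exact List.mem_map.mpr ⟨m', PySem.List.min?_mem hm', rfl⟩
        have hle1 : m ≤ m' + ((l₀.length : Int) + 1) := PySem.List.min?_isMin hmin _ hmem1
        have hmem2 : m - ((l₀.length : Int) + 1) ∈ pvHits rest := by
          have := PySem.List.min?_mem hmin
          rw [hshift] at this
          obtain ⟨h0, hh0, hh1⟩ := List.mem_map.mp this
          have : m - ((l₀.length : Int) + 1) = h0 := by omega
          rw [this]; exact hh0
        have hle2 : m' ≤ m - ((l₀.length : Int) + 1) := PySem.List.min?_isMin hm' _ hmem2
        have hmeq : m = m' + ((l₀.length : Int) + 1) := by omega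
        rw [hmin]
        rw [hm'] at ihr
        have hidx : (pvSplit rest).findIdx? pvMatchL = some ((rest.take m'.toNat).count '\n') := ihr
        have htn : m.toNat = l₀.length + (m'.toNat + 1) := by omega
        have htake : ((l₀ ++ '\n' :: rest)).take m.toNat = l₀ ++ '\n' :: rest.take m'.toNat := by
          rw [htn, List.take_length_add_append, List.take_succ_cons]
        have hcnt : (((l₀ ++ '\n' :: rest)).take m.toNat).count '\n'
            = (rest.take m'.toNat).count '\n' + 1 := by
          rw [htake]
          rw [List.count_append, List.count_cons]
          have : l₀.count '\n' = 0 := List.count_eq_zero.mpr hnl₀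
          simp [this]
        simp [List.findIdx?_cons, hm, hidx, hcnt]

-- ===== VERDICT (by name: the statement is the Claim_ definition above) =====
-- bridge: the ports' String-level pieces are the char-level objects of the lemmas above
theorem pvSplit?_str (low : String) :
    PySem.Str.split? low "\n" = some ((pvSplit low.toList).map String.ofList) := by
  rw [PySem.Str.split?]
  have h1 : ("\n" : String).toList = ['\n'] := rfl
  rw [h1, PySem.Chars.split?]
  simp [pvSplitOn_eq]

theorem pvLineMatch_ofList (l : List Char) : pvLineMatch (String.ofList l) = pvMatchL l := by
  simp [pvLineMatch, pvMatchL, PySem.Str.isIn, String.toList_ofList]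

theorem extract_relevant_resume_text_spec : Claim_equal_extract_relevant_resume_text := by
  intro text _
  unfold Spec_extract_relevant_resume_text extract_relevant_resume_text extract_relevant_resume_text_alt
  simp only []
  set low := PySem.Str.lower text with hlow
  rw [pvSplit?_str low, pvFoldFalse]
  simp only [Option.getD_some]
  have hhits : ((pvKeywords.map (fun k => PySem.Str.find low k)).filter (fun p => p ≠ -1)) = pvHits low.toList := rfl
  rw [hhits]
  have hidx : (List.findIdx? pvLineMatch ((pvSplit low.toList).map String.ofList))
      = List.findIdx? pvMatchL (pvSplit low.toList) := by
    rw [List.findIdx?_map]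
    congr 1
    funext l
    exact pvLineMatch_ofList l
  have hmain := pvMain low.toList.length low.toList le_rfl
  cases hmin : PySem.List.min? (pvHits low.toList) (fun x => x) with
  | none =>
    simp only [hmin] at hmain
    rw [hidx, hmain]
    simp
  | some m =>
    simp only [hmin] at hmain
    rw [hidx, hmain]
    simp only []
    have hilt : ((low.toList.take m.toNat).count '\n') < (pvSplit low.toList).length := by
      have := List.findIdx?_eq_some_iff_findIdx_eq.mp hmain
      omega
    have hne : ¬ (((pvSplit low.toList).map String.ofList).drop ((low.toList.take m.toNat).count '\n') = []) := by
      simp only [List.drop_eq_nil_iff, List.length_map]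
      omega
    rw [if_neg hne]
    have h0m : 0 ≤ m := pvHits_nonneg low.toList m (PySem.List.min?_mem hmin)
    have hcut : PySem.Str.count (PySem.Str.slice low none (some m)) "\n"
        = ((low.toList.take m.toNat).count '\n') := by
      rw [PySem.Str.count, PySem.Str.slice]
      have h1 : ("\n" : String).toList = ['\n'] := rfl
      rw [String.toList_ofList, h1, PySem.Chars.slice, PySem.List.slice_to _ h0m, pvCount_single]
    rw [hcut, PySem.List.slice_from_natCast _ _]
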